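-- pv_equiv track=rewrite | github.com/tooooooooomy/competition-programming | at-coder-problems/bitter-alchemy.py | solve
-- ===== SOURCE A (Python) =====
-- def solve(N, X, M):
--     rem = X - sum(M)
--     mim = min(M)
--     a = len(M)
--
--     while rem - mim > 0:
--         a += 1
--         rem -= mim
--
--     return a
-- ===== SOURCE B (Python) =====
-- def solve(N, X, M):
--     rem = X - sum(M)
--     mim = min(M)
--     if rem <= mim:
--         return len(M)
--     return len(M) + (rem - 1) // mim
-- ===== Notes on version B (the rewrite author's own statement) =====
-- stated objective: simpler
-- what changed: Replaces the repeated-subtraction while loop with a closed-form floor division (rem-1)//mim computing the iteration count directly.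
import Mathlib
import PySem

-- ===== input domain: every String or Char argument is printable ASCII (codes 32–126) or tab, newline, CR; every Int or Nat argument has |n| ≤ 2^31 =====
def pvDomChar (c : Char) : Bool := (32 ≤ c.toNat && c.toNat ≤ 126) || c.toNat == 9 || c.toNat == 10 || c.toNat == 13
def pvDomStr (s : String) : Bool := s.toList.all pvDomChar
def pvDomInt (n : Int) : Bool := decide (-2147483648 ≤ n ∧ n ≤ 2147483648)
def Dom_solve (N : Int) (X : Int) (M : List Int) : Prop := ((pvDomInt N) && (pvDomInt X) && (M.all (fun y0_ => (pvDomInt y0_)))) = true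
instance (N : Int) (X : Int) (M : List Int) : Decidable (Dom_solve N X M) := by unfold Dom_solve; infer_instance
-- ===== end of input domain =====

-- B replaces A's repeated-subtraction loop with a closed-form floor division (objective: simpler).

-- ===== PORT A =====
-- the while loop: while rem - mim > 0: a += 1; rem -= mim
-- (when mim ≤ 0 and rem - mim > 0 Python diverges; Pre_ excludes that, the port returns a there)
def solveLoop (mim : Int) (rem : Int) (a : Int) : Int :=
  if _hg : 0 < rem - mim then
    if _hm : 0 < mim then solveLoop mim (rem - mim) (a + 1)
    else a
  else a
termination_by (rem - mim).toNat
decreasing_by omega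

def solve (N : Int) (X : Int) (M : List Int) : Int :=
  let rem := X - M.sum
  let mim := (PySem.List.min? M (fun y => y)).getD 0
  solveLoop mim rem (M.length : Int)

-- ===== PORT B =====
def solve_alt (N : Int) (X : Int) (M : List Int) : Int :=
  let rem := X - M.sum
  let mim := (PySem.List.min? M (fun y => y)).getD 0
  if rem ≤ mim then (M.length : Int)
  else (M.length : Int) + PySem.Int.floordiv (rem - 1) mim

-- ===== PRECONDITION & SPEC =====
-- Pre_ excludes exactly where the Python A does not return: M = [] (min raises ValueError) and
-- min(M) ≤ 0 with X - sum(M) > min(M) (the while loop never terminates).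
def Pre_solve (N : Int) (X : Int) (M : List Int) : Prop :=
  M ≠ [] ∧ (X - M.sum ≤ (PySem.List.min? M (fun y => y)).getD 0 ∨
            0 < (PySem.List.min? M (fun y => y)).getD 0)
instance (N : Int) (X : Int) (M : List Int) : Decidable (Pre_solve N X M) := by
  unfold Pre_solve; infer_instance

def pvWitness_solve : Int × Int × List Int := (2, 10, [1, 2])

def Spec_solve (N : Int) (X : Int) (M : List Int) (out : Int) : Prop := out = solve_alt N X M
instance (N : Int) (X : Int) (M : List Int) (out : Int) : Decidable (Spec_solve N X M out) := by
  unfold Spec_solve; infer_instance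

-- ===== CLAIM (what is proved, stated in full; the proofs are below) =====
def Claim_equal_solve : Prop := ∀ (N : Int) (X : Int) (M : List Int), Dom_solve N X M → Pre_solve N X M → Spec_solve N X M (solve N X M)

-- ===== LEMMAS AND PROOFS =====

theorem fd_step (mim rem : Int) (hm : 0 < mim) :
    PySem.Int.floordiv (rem - 1) mim = PySem.Int.floordiv (rem - mim - 1) mim + 1 := by
  rw [PySem.Int.floordiv_eq_ediv_of_pos hm, PySem.Int.floordiv_eq_ediv_of_pos hm]
  have h : rem - 1 = (rem - mim - 1) + 1 * mim := by ring
  rw [h, Int.add_mul_ediv_right _ _ (by omega : mim ≠ 0)]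

theorem loop_closed (mim : Int) (hm : 0 < mim) :
    ∀ (n : Nat) (rem a : Int), (rem - mim).toNat ≤ n →
      solveLoop mim rem a =
        if rem ≤ mim then a else a + PySem.Int.floordiv (rem - 1) mim := by
  intro n
  induction n with
  | zero =>
    intro rem a h
    rw [solveLoop]
    have hle : rem ≤ mim := by omega
    simp [show ¬ (0 < rem - mim) by omega, hle]
  | succ n ih =>
    intro rem a h
    rw [solveLoop]
    by_cases hg : 0 < rem - mim
    · simp only [hg, hm, dite_true]
      rw [ih (rem - mim) (a + 1) (by omega)]
      rw [if_neg (by omega : ¬ rem ≤ mim)]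
      by_cases h2 : rem - mim ≤ mim
      · rw [if_pos h2, fd_step mim rem hm]
        have hz : PySem.Int.floordiv (rem - mim - 1) mim = 0 := by
          rw [PySem.Int.floordiv_eq_ediv_of_pos hm]
          exact Int.ediv_eq_zero_of_lt (by omega) (by omega)
        omega
      · rw [if_neg h2, fd_step mim rem hm]
        ring
    · have hle : rem ≤ mim := by omega
      simp [hg, hle]

-- ===== VERDICT (by name: the statement is the Claim_ definition above) =====
theorem solve_spec : Claim_equal_solve := by
  intro N X M _ hpre
  obtain ⟨hne, hpre⟩ := hpre
  unfold Spec_solve solve solve_alt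
  simp only
  set rem := X - M.sum with hrem
  set mim := (PySem.List.min? M (fun y => y)).getD 0 with hmim
  rcases hpre with hle | hpos
  · rw [solveLoop]
    simp [show ¬ (0 < rem - mim) by omega, show rem ≤ mim from hle]
  · exact loop_closed mim hpos (rem - mim).toNat rem (M.length : Int) le_rfl
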